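-- pv_equiv track=rewrite | github.com/zgotter/algorithm-python | programmers/고득점Kit/완전탐색/카펫_01_fail.py | solution
-- ===== SOURCE A (Python) =====
-- def solution(brown, yellow):
--     answer = []
--     total = brown + yellow
--     width_list = [i+1 for i in range(total//2) if total % (i+1) == 0] + [total]
--     width_list.sort(reverse=True)
--
--     square = [(w, total//w) for w in width_list if w >= (total//w)]
--     answer = [s for s in square[-1]]
--
--     return answer
-- ===== SOURCE B (Python) =====
-- def solution(brown, yellow):
--     total = brown + yellow
--     d = 1
--     best = 1
--     while d * d <= total:
--         if total % d == 0:
--             best = d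
--         d += 1
--     return [total // best, best]
-- ===== Notes on version B (the rewrite author's own statement) =====
-- stated objective: faster
-- what changed: Instead of enumerating all divisors up to total//2, sorting them descending and filtering factor pairs, B scans d from 1 while d*d <= total keeping the largest divisor found, then returns [total//d, d].
import Mathlib
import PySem

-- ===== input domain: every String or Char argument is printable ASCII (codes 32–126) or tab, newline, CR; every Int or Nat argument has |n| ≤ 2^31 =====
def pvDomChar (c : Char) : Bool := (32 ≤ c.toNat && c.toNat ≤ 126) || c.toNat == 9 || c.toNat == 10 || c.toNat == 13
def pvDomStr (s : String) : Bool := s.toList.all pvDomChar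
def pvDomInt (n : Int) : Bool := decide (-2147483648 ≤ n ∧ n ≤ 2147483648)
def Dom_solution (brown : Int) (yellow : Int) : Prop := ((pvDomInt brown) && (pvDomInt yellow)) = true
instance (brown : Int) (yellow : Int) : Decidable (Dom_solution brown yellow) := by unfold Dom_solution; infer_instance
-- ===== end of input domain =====

-- B replaces A's full divisor enumeration (up to total//2) plus descending sort by a single
-- scan of d from 1 while d*d ≤ total keeping the last divisor seen.

-- ===== PORT A =====
-- literal port of Source A; where Python raises (total ≤ 0: ZeroDivisionError at total//0, or
-- IndexError on square[-1]) the pyGet? is none and the port returns [] — outside Pre_.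
def solution (brown : Int) (yellow : Int) : List Int :=
  let total := brown + yellow
  let widthList :=
    ((PySem.List.pyRange 0 (PySem.Int.floordiv total 2) 1).filterMap
      (fun i => if PySem.Int.mod total (i + 1) = 0 then some (i + 1) else none)) ++ [total]
  let widthList := PySem.List.sorted widthList (fun w => w) true
  let square := widthList.filterMap (fun w =>
    if PySem.Int.floordiv total w ≤ w then some (w, PySem.Int.floordiv total w) else none)
  match PySem.List.pyGet? square (-1) with
  | some s => [s.1, s.2]
  | none => []

-- ===== PORT B =====
-- the while loop of Source B; d strictly increases, guard d*d ≤ total bounds it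
def altLoop (total d best : Int) : Int :=
  if _h : d * d ≤ total then
    altLoop total (d + 1) (if PySem.Int.mod total d = 0 then d else best)
  else best
termination_by (total + 1 - d).toNat
decreasing_by
  have hd : d ≤ total := by nlinarith [sq_nonneg d, sq_nonneg (d - 1)]
  omega

def solution_alt (brown : Int) (yellow : Int) : List Int :=
  let total := brown + yellow
  let best := altLoop total 1 1
  [PySem.Int.floordiv total best, best]

-- ===== PRECONDITION & SPEC =====
-- Pre_ excludes exactly the inputs where A raises: total = 0 divides by zero, and
-- total < 0 leaves square empty so square[-1] raises IndexError.
def Pre_solution (brown : Int) (yellow : Int) : Prop := 1 ≤ brown + yellow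
instance (brown : Int) (yellow : Int) : Decidable (Pre_solution brown yellow) := by
  unfold Pre_solution; infer_instance

def pvWitness_solution : Int × Int := (10, 2)

def Spec_solution (brown : Int) (yellow : Int) (out : List Int) : Prop := out = solution_alt brown yellow
instance (brown : Int) (yellow : Int) (out : List Int) : Decidable (Spec_solution brown yellow out) := by
  unfold Spec_solution; infer_instance

-- ===== CLAIM (what is proved, stated in full; the proofs are below) =====
def Claim_equal_solution : Prop := ∀ (brown : Int) (yellow : Int), Dom_solution brown yellow → Pre_solution brown yellow → Spec_solution brown yellow (solution brown yellow)

-- ===== LEMMAS AND PROOFS =====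

-- the greatest divisor d of n with d*d ≤ n: both programs' answer is [n/d, d]
def bigDiv (n : Nat) : Nat := Nat.findGreatest (fun d => d ∣ n ∧ d * d ≤ n) n.sqrt

lemma bigDiv_pos (n : Nat) (hn : 1 ≤ n) : 1 ≤ bigDiv n := by
  apply Nat.le_findGreatest (Nat.sqrt_pos.mpr hn) ⟨one_dvd n, by omega⟩

lemma bigDiv_spec (n : Nat) (hn : 1 ≤ n) : bigDiv n ∣ n ∧ bigDiv n * bigDiv n ≤ n := by
  unfold bigDiv
  exact Nat.findGreatest_spec (P := fun d => d ∣ n ∧ d * d ≤ n) (Nat.sqrt_pos.mpr hn)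
    ⟨one_dvd n, by omega⟩

lemma bigDiv_greatest (n : Nat) {e : Nat} (he : e ∣ n) (h2 : e * e ≤ n) : e ≤ bigDiv n := by
  apply Nat.le_findGreatest _ ⟨he, h2⟩
  rw [Nat.le_sqrt']; nlinarith

-- B's loop keeps the largest divisor seen so far; at exit it holds bigDiv n
lemma altLoop_eq_aux (n : Nat) (hn : 1 ≤ n) :
    ∀ (k d b : Nat), n + 1 - d = k → 1 ≤ d → b ∣ n → b * b ≤ n →
    (∀ e, e < d → e ∣ n → e * e ≤ n → e ≤ b) →
    altLoop (n : Int) (d : Int) (b : Int) = ((bigDiv n : Nat) : Int) := by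
  intro k
  induction k using Nat.strong_induction_on with
  | _ k ih =>
    intro d b hk hd hb hbb hmax
    rw [altLoop]
    by_cases hc : (d : Int) * d ≤ (n : Int)
    · rw [dif_pos hc]
      have hdd : d * d ≤ n := by exact_mod_cast hc
      have hdn : d ≤ n := le_trans (Nat.le_mul_of_pos_left d hd) hdd
      have hcast : (d : Int) + 1 = ((d + 1 : Nat) : Int) := by push_cast; ring
      by_cases hdvd : d ∣ n
      · have hmod : PySem.Int.mod (n : Int) (d : Int) = 0 := by
          rw [PySem.Int.mod_eq_zero_iff_dvd]; exact_mod_cast hdvd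
        rw [if_pos hmod, hcast]
        exact ih (n + 1 - (d + 1)) (by omega) (d + 1) d rfl (by omega) hdvd hdd
          (fun e he _ _ => by omega)
      · have hmod : ¬ PySem.Int.mod (n : Int) (d : Int) = 0 := by
          rw [PySem.Int.mod_eq_zero_iff_dvd]; exact_mod_cast hdvd
        rw [if_neg hmod, hcast]
        refine ih (n + 1 - (d + 1)) (by omega) (d + 1) b rfl (by omega) hb hbb ?_
        intro e he hedvd hee
        rcases Nat.lt_succ_iff_lt_or_eq.mp he with h | h
        · exact hmax e h hedvd hee
        · subst h; exact absurd hedvd hdvd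
    · rw [dif_neg hc]
      have hdd : n < d * d := by exact_mod_cast not_le.mp hc
      have hGb : bigDiv n ≤ b := by
        apply hmax _ _ (bigDiv_spec n hn).1 (bigDiv_spec n hn).2
        by_contra hlt
        push Not at hlt
        have := (bigDiv_spec n hn).2
        nlinarith
      have hbG : b ≤ bigDiv n := bigDiv_greatest n hb hbb
      omega

lemma altLoop_eq (n : Nat) (hn : 1 ≤ n) :
    altLoop (n : Int) 1 1 = ((bigDiv n : Nat) : Int) := by
  have := altLoop_eq_aux n hn n 1 1 (by omega) (by omega) (one_dvd n) (by omega)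
    (fun e he _ _ => by omega)
  exact_mod_cast this

-- A's width_list before sorting (divisors of n up to n/2, ascending, as Ints)
def ascN (n : Nat) : List Int :=
  (List.range (n / 2)).filterMap (fun i => if (i + 1) ∣ n then some (((i + 1 : Nat)) : Int) else none)

-- A's factor-pair filter
def gfun (n : Nat) (w : Int) : Option (Int × Int) :=
  if PySem.Int.floordiv (n : Int) w ≤ w then some (w, PySem.Int.floordiv (n : Int) w) else none

lemma mem_ascN {n : Nat} {x : Int} (hx : x ∈ ascN n) :
    ∃ d : Nat, 1 ≤ d ∧ d ≤ n / 2 ∧ d ∣ n ∧ x = (d : Int) := by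
  simp only [ascN, List.mem_filterMap, List.mem_range] at hx
  obtain ⟨i, hi, hif⟩ := hx
  by_cases h : (i + 1) ∣ n
  · rw [if_pos h] at hif
    exact ⟨i + 1, by omega, by omega, h, (Option.some_inj.mp hif).symm⟩
  · rw [if_neg h] at hif; cases hif

lemma pairwise_ascN (n : Nat) (_hn : 1 ≤ n) :
    (ascN n ++ [(n : Int)]).Pairwise (· < ·) := by
  rw [List.pairwise_append]
  refine ⟨?_, List.pairwise_singleton _ _, ?_⟩
  · rw [ascN, List.pairwise_filterMap]
    have := List.pairwise_lt_range (n := n / 2)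
    apply this.imp_of_mem
    intro a b _ _ hab x hx y hy
    split_ifs at hx hy with h1 h2
    · cases hx; cases hy; exact_mod_cast by omega
  · intro a ha b hb
    obtain ⟨d, hd1, hd2, _, rfl⟩ := mem_ascN ha
    rw [List.mem_singleton] at hb
    subst hb
    have : d < n := by omega
    exact_mod_cast this

-- divisors strictly below n/bigDiv n never satisfy n//w ≤ w
lemma gnone (n : Nat) (hn : 1 ≤ n) {d : Nat} (hd1 : 1 ≤ d) (hdvd : d ∣ n)
    (hlt : d < n / bigDiv n) : gfun n (d : Int) = none := by
  unfold gfun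
  rw [PySem.Int.floordiv_natCast, if_neg]
  rw [Nat.cast_le, not_le]
  by_contra hle
  push Not at hle
  have hdn : d ≤ n := Nat.le_of_dvd (by omega) hdvd
  have hq : n / d ∣ n := Nat.div_dvd_of_dvd hdvd
  have hqq : (n / d) * (n / d) ≤ n := by
    calc (n / d) * (n / d) ≤ (n / d) * d := Nat.mul_le_mul_left _ hle
    _ = n := Nat.div_mul_cancel hdvd
  have hqG : n / d ≤ bigDiv n := bigDiv_greatest n hq hqq
  have hpos : 0 < n / d := Nat.div_pos hdn (by omega)
  have h2 := Nat.div_le_div_left (a := n) hqG hpos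
  rw [Nat.div_div_self hdvd (by omega)] at h2
  omega

lemma gsome (n : Nat) (hn : 1 ≤ n) :
    gfun n ((n / bigDiv n : Nat) : Int) = some (((n / bigDiv n : Nat) : Int), ((bigDiv n : Nat) : Int)) := by
  have hG1 := bigDiv_pos n hn
  have hGdvd := (bigDiv_spec n hn).1
  have hGG := (bigDiv_spec n hn).2
  have hnW : n / (n / bigDiv n) = bigDiv n := Nat.div_div_self hGdvd (by omega)
  have hGleW : bigDiv n ≤ n / bigDiv n := (Nat.le_div_iff_mul_le hG1).mpr hGG
  unfold gfun
  rw [PySem.Int.floordiv_natCast, hnW, if_pos (by exact_mod_cast hGleW)]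

lemma head?_filterMap_append {α β : Type} (g : α → Option β) (l1 l2 : List α)
    (h : ∀ u ∈ l1, g u = none) :
    (List.filterMap g (l1 ++ l2)).head? = (List.filterMap g l2).head? := by
  rw [List.filterMap_append, List.filterMap_eq_nil_iff.mpr h, List.nil_append]

-- the first surviving element of A's ascending width list is (n/bigDiv n, bigDiv n)
lemma head_core (n : Nat) (hn : 1 ≤ n) :
    (List.filterMap (gfun n) (ascN n ++ [(n : Int)])).head? =
      some (((n / bigDiv n : Nat) : Int), ((bigDiv n : Nat) : Int)) := by
  have hG1 := bigDiv_pos n hn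
  have hGdvd := (bigDiv_spec n hn).1
  have hWdvd : n / bigDiv n ∣ n := Nat.div_dvd_of_dvd hGdvd
  have hW1 : 1 ≤ n / bigDiv n := Nat.div_pos (Nat.le_of_dvd (by omega) hGdvd) (by omega)
  have hgsome := gsome n hn
  set W := n / bigDiv n with hW
  by_cases hsmall : W ≤ n / 2
  · -- W appears inside ascN; every divisor before it is filtered out by gfun
    have hsplit : List.range (n / 2) =
        List.range (W - 1) ++ List.map (fun x => (W - 1) + x) (List.range (n / 2 - (W - 1))) := by
      rw [← List.range_add]; congr 1; omega
    obtain ⟨m, hm⟩ : ∃ m, n / 2 - (W - 1) = m + 1 := ⟨n / 2 - W, by omega⟩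
    have hasc : ascN n = (List.range (W - 1)).filterMap
          (fun i => if (i + 1) ∣ n then some (((i + 1 : Nat)) : Int) else none) ++
        ((W : Int) :: (List.map (fun x => (W - 1) + x) (List.map Nat.succ (List.range m))).filterMap
          (fun i => if (i + 1) ∣ n then some (((i + 1 : Nat)) : Int) else none)) := by
      rw [ascN, hsplit, List.filterMap_append, hm, List.range_succ_eq_map, List.map_cons]
      congr 1
      rw [List.filterMap_cons]
      have e : W - 1 + 0 + 1 = W := by omega
      simp only [e, if_pos hWdvd]
    rw [hasc, List.append_assoc, List.cons_append, head?_filterMap_append,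
        List.filterMap_cons_some hgsome, List.head?_cons]
    intro u hu
    simp only [List.mem_filterMap, List.mem_range] at hu
    obtain ⟨i, hi, hif⟩ := hu
    by_cases h : (i + 1) ∣ n
    · rw [if_pos h] at hif
      cases hif
      exact gnone n hn (by omega) h (by omega)
    · rw [if_neg h] at hif; cases hif
  · -- W = n : the appended total itself is the first (only) surviving element
    have hWn : W = n := by
      obtain ⟨c, hc⟩ := hWdvd
      rcases Nat.lt_or_ge c 2 with h2 | h2
      · interval_cases c <;> omega
      · exfalso
        have : W ≤ n / 2 := (Nat.le_div_iff_mul_le (by omega)).mpr (by nlinarith)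
        omega
    rw [head?_filterMap_append]
    · rw [hWn] at hgsome
      rw [List.filterMap_cons_some hgsome, List.head?_cons, hWn]
    · intro u hu
      obtain ⟨d, hd1, hd2, hdvd, rfl⟩ := mem_ascN hu
      exact gnone n hn hd1 hdvd (by omega)

lemma solution_eq (brown yellow : Int) (h : 1 ≤ brown + yellow) :
    solution brown yellow =
      [(((brown + yellow).toNat / bigDiv (brown + yellow).toNat : Nat) : Int),
       ((bigDiv (brown + yellow).toNat : Nat) : Int)] := by
  obtain ⟨n, hn, ht⟩ : ∃ n : Nat, 1 ≤ n ∧ brown + yellow = (n : Int) :=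
    ⟨(brown + yellow).toNat, by omega, by omega⟩
  rw [show (brown + yellow).toNat = n from by omega]
  unfold solution
  simp only [ht]
  have h2 : PySem.Int.floordiv ((n : Int)) 2 = ((n / 2 : Nat) : Int) := by
    exact_mod_cast PySem.Int.floordiv_natCast n 2
  have hasc : (PySem.List.pyRange 0 (PySem.Int.floordiv ((n : Int)) 2) 1).filterMap
      (fun i => if PySem.Int.mod ((n : Int)) (i + 1) = 0 then some (i + 1) else none) = ascN n := by
    rw [h2, PySem.List.pyRange_one, List.filterMap_map, ascN]
    rw [show (((n / 2 : Nat) : Int) - 0).toNat = n / 2 from by omega]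
    apply List.filterMap_congr
    intro i _
    simp only [Function.comp_apply, PySem.Int.mod_eq_zero_iff_dvd]
    have hcast : ((i : Int) + 1 ∣ (n : Int)) ↔ ((i + 1) ∣ n) := by exact_mod_cast Iff.rfl
    simp only [zero_add, hcast]
    split_ifs with hdv
    · norm_num
    · rfl
  rw [hasc]
  have hsorted : PySem.List.sorted (ascN n ++ [(n : Int)]) (fun w => w) true =
      (ascN n ++ [(n : Int)]).reverse :=
    PySem.List.sorted_rev_eq_of_perm_of_pairwise_gt _ _ _ (List.reverse_perm _)
      (by rw [List.pairwise_reverse]; exact pairwise_ascN n hn)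
  rw [hsorted]
  have hg : (fun w => if PySem.Int.floordiv ((n : Int)) w ≤ w then
      some (w, PySem.Int.floordiv ((n : Int)) w) else none) = gfun n := rfl
  rw [hg, List.filterMap_reverse, PySem.List.pyGet?_neg_one, List.getLast?_reverse, head_core n hn]

lemma solution_alt_eq (brown yellow : Int) (h : 1 ≤ brown + yellow) :
    solution_alt brown yellow =
      [(((brown + yellow).toNat / bigDiv (brown + yellow).toNat : Nat) : Int),
       ((bigDiv (brown + yellow).toNat : Nat) : Int)] := by
  obtain ⟨n, hn, ht⟩ : ∃ n : Nat, 1 ≤ n ∧ brown + yellow = (n : Int) :=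
    ⟨(brown + yellow).toNat, by omega, by omega⟩
  rw [show (brown + yellow).toNat = n from by omega]
  unfold solution_alt
  simp only [ht, altLoop_eq n hn]
  rw [PySem.Int.floordiv_natCast]

-- ===== VERDICT (by name: the statement is the Claim_ definition above) =====
theorem solution_spec : Claim_equal_solution := by
  intro brown yellow _ hpre
  unfold Spec_solution
  rw [solution_eq brown yellow hpre, solution_alt_eq brown yellow hpre]
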